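-- pv_equiv track=rewrite | github.com/Supakarn-Y/ODDSAssignment | spec.py | funcE
-- ===== SOURCE A (Python) =====
-- def funcE(text) :
--     check = ["DDO","NEVE"]
--     text1 = ""
--     result = ""
--     i = 0
--     while i < len(text) :
--         if(text1 == check[0] or text1 == check[1]):
--             text1 =  text1[::-1]
--             text1 = text1[0].upper() + text1[1:].lower()
--             text1 += text[i]
--             result += text1
--             text1 = ""
--             i += 1
--         else :
--             text1 += text[i]
--             i += 1
--     return result
-- ===== SOURCE B (Python) =====
-- def funcE(text):
--     # One left-to-right pass over positions: a run can only flush when the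
--     # buffer (chars since the last flush) is exactly "DDO" or "NEVE" and a
--     # following char exists; otherwise the buffer grows forever and nothing
--     # more is emitted.
--     out = []
--     pos = 0
--     n = len(text)
--     while True:
--         if text[pos:pos + 3] == "DDO" and pos + 3 < n:
--             out.append("Odd" + text[pos + 3])
--             pos += 4
--         elif text[pos:pos + 4] == "NEVE" and pos + 4 < n:
--             out.append("Even" + text[pos + 4])
--             pos += 5
--         else:
--             break
--     return "".join(out)
-- ===== Notes on version B (the rewrite author's own statement) =====
-- stated objective: faster
-- what changed: B drops A's ever-growing buffer string and repeated string concatenation: it scans by position, testing only the fixed 3/4-char prefixes 'DDO'/'NEVE' at each resume point and joining the emitted pieces once at the end.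
import Mathlib
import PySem

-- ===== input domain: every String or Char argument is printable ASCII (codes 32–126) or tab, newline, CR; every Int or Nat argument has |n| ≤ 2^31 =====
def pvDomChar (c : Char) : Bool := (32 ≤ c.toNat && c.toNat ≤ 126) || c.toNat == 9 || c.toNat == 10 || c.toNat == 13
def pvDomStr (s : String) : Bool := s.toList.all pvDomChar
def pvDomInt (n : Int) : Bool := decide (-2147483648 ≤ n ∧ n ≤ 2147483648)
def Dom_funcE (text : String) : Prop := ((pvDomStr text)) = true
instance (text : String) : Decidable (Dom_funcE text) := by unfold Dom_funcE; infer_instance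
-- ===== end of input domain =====

-- B replaces A's ever-growing buffer and repeated string concatenation with a single
-- positional scan that only tests fixed 3/4-char prefixes; return value only.

-- ===== PORT A =====
-- text1[::-1] then text1[0].upper() + text1[1:].lower(), on the buffer as List Char
def funcE_cap : List Char → List Char
  | [] => []            -- text1[0] would raise; unreachable (buffer nonempty in the flush branch)
  | h :: t => PySem.Chars.upper [h] ++ PySem.Chars.lower t

-- A's while-loop increments i once per iteration, so it is a fold over the
-- characters with state (text1, result), both kept as List Char.
def funcE_step (st : List Char × List Char) (c : Char) : List Char × List Char :=
  if st.1 = ['D','D','O'] ∨ st.1 = ['N','E','V','E'] then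
    ([], st.2 ++ (funcE_cap st.1.reverse ++ [c]))
  else
    (st.1 ++ [c], st.2)

def funcE (text : String) : String :=
  String.ofList (text.toList.foldl funcE_step ([], [])).2

-- ===== PORT B =====
-- Source B's positional scan: at the current position, a "DDO" prefix with a following
-- char emits "Odd"+c, else a "NEVE" prefix with a following char emits "Even"+c,
-- else the loop breaks.
def funcE_go : List Char → List Char
  | 'D' :: 'D' :: 'O' :: c :: rest => 'O' :: 'd' :: 'd' :: c :: funcE_go rest
  | 'N' :: 'E' :: 'V' :: 'E' :: c :: rest => 'E' :: 'v' :: 'e' :: 'n' :: c :: funcE_go rest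
  | _ => []

def funcE_alt (text : String) : String :=
  String.ofList (funcE_go text.toList)

-- ===== PRECONDITION & SPEC =====
def Spec_funcE (text : String) (out : String) : Prop := out = funcE_alt text
instance (text : String) (out : String) : Decidable (Spec_funcE text out) := by unfold Spec_funcE; infer_instance

-- ===== CLAIM (what is proved, stated in full; the proofs are below) =====
def Claim_equal_funcE : Prop := ∀ (text : String), Dom_funcE text → Spec_funcE text (funcE text)

-- ===== LEMMAS AND PROOFS =====

theorem step_DDO (res : List Char) (c : Char) :
    funcE_step (['D','D','O'], res) c = ([], res ++ ['O','d','d',c]) := by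
  have h : funcE_cap (['O','D','D'] : List Char) = ['O','d','d'] := by decide
  simp [funcE_step, h]

theorem step_NEVE (res : List Char) (c : Char) :
    funcE_step (['N','E','V','E'], res) c = ([], res ++ ['E','v','e','n',c]) := by
  have h : funcE_cap (['E','V','E','N'] : List Char) = ['E','v','e','n'] := by decide
  simp [funcE_step, h]

theorem step_no (t1 res : List Char) (c : Char)
    (h : ¬ (t1 = ['D','D','O'] ∨ t1 = ['N','E','V','E'])) :
    funcE_step (t1, res) c = (t1 ++ [c], res) := by
  simp [funcE_step, h]

-- buffers of length 0, 1, 2 never match, so the first three chars just accumulate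
theorem foldl3 (a b c : Char) (rest res : List Char) :
    (a :: b :: c :: rest).foldl funcE_step ([], res) = rest.foldl funcE_step ([a,b,c], res) := by
  simp [List.foldl_cons, funcE_step]

-- the result component only ever grows by appending
theorem funcE_res_acc (rest : List Char) : ∀ (t1 res : List Char),
    (rest.foldl funcE_step (t1, res)).2 = res ++ (rest.foldl funcE_step (t1, [])).2 := by
  induction rest with
  | nil => intro t1 res; simp
  | cons c rest ih =>
    intro t1 res
    simp only [List.foldl_cons, funcE_step]
    split_ifs with h
    · rw [ih ([]) (res ++ _), ih ([]) ([] ++ _)]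
      simp
    · exact ih _ _

-- a buffer of length ≥ 5 is dead: nothing is ever emitted again
theorem funcE_dead (rest : List Char) : ∀ (t1 : List Char), 5 ≤ t1.length →
    (rest.foldl funcE_step (t1, [])).2 = [] := by
  induction rest with
  | nil => intro t1 _; simp
  | cons c rest ih =>
    intro t1 h
    have h1 : ¬ (t1 = ['D','D','O'] ∨ t1 = ['N','E','V','E']) := by
      rintro (rfl | rfl) <;> simp at h
    rw [List.foldl_cons, step_no _ _ _ h1]
    exact ih _ (by simp; omega)

theorem funcE_main (rest : List Char) :
    (rest.foldl funcE_step ([], [])).2 = funcE_go rest := by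
  induction rest using funcE_go.induct with
  | case1 c rest ih =>
    rw [funcE_go, foldl3, List.foldl_cons, step_DDO, funcE_res_acc, ih]
    rfl
  | case2 c rest ih =>
    rw [funcE_go]
    rw [show ('N' :: 'E' :: 'V' :: 'E' :: c :: rest) = 'N' :: 'E' :: 'V' :: ('E' :: c :: rest) from rfl,
        foldl3, List.foldl_cons,
        step_no _ _ _ (by decide)]
    simp only [List.cons_append, List.nil_append]
    rw [List.foldl_cons, step_NEVE, funcE_res_acc, ih]
    rfl
  | case3 rest h1 h2 =>
    match rest with
    | [] => rfl
    | [a] => simp [funcE_go, List.foldl, funcE_step]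
    | [a, b] => simp [funcE_go, List.foldl, funcE_step]
    | [a, b, c] =>
      rw [foldl3]
      simp [funcE_go]
    | [a, b, c, d] =>
      have hd : ¬ (([a,b,c] : List Char) = ['D','D','O'] ∨ ([a,b,c] : List Char) = ['N','E','V','E']) := by
        rintro (h | h) <;> simp_all
      rw [foldl3, List.foldl_cons, step_no _ _ _ hd]
      simp [funcE_go]
    | a :: b :: c :: d :: e :: rest' =>
      have hd : ¬ (([a,b,c] : List Char) = ['D','D','O'] ∨ ([a,b,c] : List Char) = ['N','E','V','E']) := by
        rintro (h | h) <;> simp_all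
      have hn : ¬ (([a,b,c,d] : List Char) = ['D','D','O'] ∨ ([a,b,c,d] : List Char) = ['N','E','V','E']) := by
        rintro (h | h) <;> simp_all
      rw [foldl3, List.foldl_cons, step_no _ _ _ hd]
      simp only [List.cons_append, List.nil_append]
      rw [List.foldl_cons, step_no _ _ _ hn]
      simp only [List.cons_append, List.nil_append]
      rw [funcE_dead _ _ (by simp)]
      rw [funcE_go.eq_def]
      split <;> simp_all

-- ===== VERDICT (by name: the statement is the Claim_ definition above) =====
theorem funcE_spec : Claim_equal_funcE := by
  intro text _
  unfold Spec_funcE funcE funcE_alt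
  rw [funcE_main]
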